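-- pv_equiv track=rewrite | github.com/vladimirkokshenev/Algorithms | tsp.py | get_set_mask
-- ===== SOURCE A (Python) =====
-- def get_set_mask(s, n):
--
--     msk = 0
--
--     for i in range(1, n+1):
--         if i in s:
--             msk = (msk << 1) | 1
--         else:
--             msk = msk << 1
--
--     return msk
-- ===== SOURCE B (Python) =====
-- def get_set_mask(s, n):
--     # Sum each present element's positional bit weight directly instead of
--     # shifting an accumulator across every position 1..n.
--     return sum(1 << (n - i) for i in set(s) if 1 <= i <= n)
-- ===== Notes on version B (the rewrite author's own statement) =====
-- stated objective: faster
-- what changed: Instead of scanning every position 1..n and testing membership in the list s at each step while shifting an accumulator, B iterates once over the distinct elements of s and sums each in-range element's bit weight 1 << (n-i).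
import Mathlib
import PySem

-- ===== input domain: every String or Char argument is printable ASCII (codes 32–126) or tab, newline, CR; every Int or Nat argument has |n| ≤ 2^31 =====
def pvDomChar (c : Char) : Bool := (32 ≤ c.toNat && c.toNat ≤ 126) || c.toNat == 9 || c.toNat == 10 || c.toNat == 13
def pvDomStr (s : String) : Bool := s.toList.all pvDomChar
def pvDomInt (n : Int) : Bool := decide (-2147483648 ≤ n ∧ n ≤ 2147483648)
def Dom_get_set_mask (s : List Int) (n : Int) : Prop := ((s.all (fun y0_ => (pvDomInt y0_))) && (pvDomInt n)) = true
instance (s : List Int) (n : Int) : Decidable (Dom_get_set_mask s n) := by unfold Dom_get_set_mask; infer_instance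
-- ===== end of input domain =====

-- ===== PORT A =====
-- B replaces A's per-position scan 1..n (with a list-membership test at each step) by one pass over the distinct elements of s, summing bit weights directly.
def get_set_mask (s : List Int) (n : Int) : Int :=
  -- for i in range(1, n+1): msk = (msk << 1) | 1 if i in s else msk << 1
  -- (shift amount is the literal 1, a nonnegative int, so the Nat shift is exact)
  (PySem.List.pyRange 1 (n + 1) 1).foldl
    (fun msk i => if s.contains i then Int.lor (msk <<< (1 : Nat)) 1 else msk <<< (1 : Nat)) 0

-- ===== PORT B =====
def get_set_mask_alt (s : List Int) (n : Int) : Int :=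
  -- sum(1 << (n - i) for i in set(s) if 1 <= i <= n); summing ints over a set's
  -- iteration order is order-independent; under the guard 1 ≤ i ≤ n the shift
  -- amount n - i is nonnegative, so .toNat is exact
  (((PySem.Set.ofList s).filter (fun i => decide (1 ≤ i) && decide (i ≤ n))).map
    (fun i => (1 : Int) <<< (n - i).toNat)).sum

-- ===== PRECONDITION & SPEC =====
def Spec_get_set_mask (s : List Int) (n : Int) (out : Int) : Prop := out = get_set_mask_alt s n
instance (s : List Int) (n : Int) (out : Int) : Decidable (Spec_get_set_mask s n out) := by unfold Spec_get_set_mask; infer_instance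

-- ===== CLAIM (what is proved, stated in full; the proofs are below) =====
def Claim_equal_get_set_mask : Prop := ∀ (s : List Int) (n : Int), Dom_get_set_mask s n → Spec_get_set_mask s n (get_set_mask s n)

-- ===== LEMMAS AND PROOFS =====

-- `S L n` : sum over L of each element's bit weight, 0 for out-of-range elements.
def pvS (L : List Int) (n : Int) : Int :=
  (L.map (fun i => if 1 ≤ i ∧ i ≤ n then (2 : Int) ^ (n - i).toNat else 0)).sum

theorem pvS_cons (x : Int) (L : List Int) (n : Int) :
    pvS (x :: L) n = (if 1 ≤ x ∧ x ≤ n then (2 : Int) ^ (n - x).toNat else 0) + pvS L n := by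
  simp [pvS]

theorem pvS_nonneg (L : List Int) (n : Int) : 0 ≤ pvS L n := by
  induction L with
  | nil => simp [pvS]
  | cons x L ih =>
      rw [pvS_cons]
      have : (0:Int) ≤ (if 1 ≤ x ∧ x ≤ n then (2 : Int) ^ (n - x).toNat else 0) := by
        split_ifs <;> positivity
      omega

theorem pvS_nonpos (L : List Int) (n : Int) (h : n ≤ 0) : pvS L n = 0 := by
  induction L with
  | nil => rfl
  | cons x L ih =>
      rw [pvS_cons, ih]
      have : ¬ (1 ≤ x ∧ x ≤ n) := by omega
      simp [this]

theorem pvS_succ (L : List Int) (n : Int) (hn : 0 ≤ n) (hnd : L.Nodup) :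
    pvS L (n + 1) = 2 * pvS L n + (if (n + 1) ∈ L then 1 else 0) := by
  induction L with
  | nil => simp [pvS]
  | cons x L ih =>
      have hnd' : L.Nodup := hnd.of_cons
      rw [pvS_cons, pvS_cons, ih hnd']
      by_cases hx : x = n + 1
      · subst hx
        have hxL : (n + 1) ∉ L := (List.nodup_cons.mp hnd).1
        rw [if_pos (List.mem_cons_self), if_neg hxL,
            if_pos (show 1 ≤ n + 1 ∧ n + 1 ≤ n + 1 by omega),
            if_neg (show ¬ (1 ≤ n + 1 ∧ n + 1 ≤ n) by omega)]
        rw [show (n + 1 - (n + 1)).toNat = 0 by omega]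
        simp
        ring
      · have hcc : ((n + 1) ∈ x :: L) ↔ ((n + 1) ∈ L) := by
          simp [List.mem_cons, Ne.symm hx]
        by_cases hm : (n + 1) ∈ L
        · rw [if_pos (hcc.mpr hm), if_pos hm]
          by_cases hr : 1 ≤ x ∧ x ≤ n
          · have hr' : 1 ≤ x ∧ x ≤ n + 1 := by omega
            have hpow : (2 : Int) ^ (n + 1 - x).toNat = 2 * (2 : Int) ^ (n - x).toNat := by
              have h : (n + 1 - x).toNat = (n - x).toNat + 1 := by omega
              rw [h, pow_succ]; ring
            rw [if_pos hr', if_pos hr, hpow]; ring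
          · have hr' : ¬ (1 ≤ x ∧ x ≤ n + 1) := by omega
            rw [if_neg hr', if_neg hr]; ring
        · rw [if_neg (fun h => hm (hcc.mp h)), if_neg hm]
          by_cases hr : 1 ≤ x ∧ x ≤ n
          · have hr' : 1 ≤ x ∧ x ≤ n + 1 := by omega
            have hpow : (2 : Int) ^ (n + 1 - x).toNat = 2 * (2 : Int) ^ (n - x).toNat := by
              have h : (n + 1 - x).toNat = (n - x).toNat + 1 := by omega
              rw [h, pow_succ]; ring
            rw [if_pos hr', if_pos hr, hpow]; ring
          · have hr' : ¬ (1 ≤ x ∧ x ≤ n + 1) := by omega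
            rw [if_neg hr', if_neg hr]; ring

theorem pv_shift_one (m : Int) : m <<< (1 : Nat) = 2 * m := by
  rw [Int.shiftLeft_eq]; ring

theorem pv_nat_lor (k : Nat) : (2 * k) ||| 1 = 2 * k + 1 := by
  apply Nat.eq_of_testBit_eq
  intro i
  cases i with
  | zero => simp [Nat.testBit_zero]
  | succ j =>
      rw [Nat.testBit_or, Nat.testBit_succ, Nat.testBit_succ, Nat.testBit_succ]
      have h1 : 2 * k / 2 = k := by omega
      have h2 : (2 * k + 1) / 2 = k := by omega
      have h3 : (1 : Nat) / 2 = 0 := by omega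
      rw [h1, h2, h3]
      simp

theorem pv_lor_step (m : Int) (h : 0 ≤ m) : Int.lor (m <<< (1 : Nat)) 1 = 2 * m + 1 := by
  obtain ⟨k, rfl⟩ := Int.eq_ofNat_of_zero_le h
  rw [pv_shift_one]
  rw [show (2 : Int) * (k : Int) = ((2 * k : Nat) : Int) by push_cast; ring]
  rw [show Int.lor ((2 * k : Nat) : Int) 1 = (((2 * k) ||| 1 : Nat) : Int) from rfl]
  rw [pv_nat_lor]
  push_cast; ring

-- B's port equals pvS over the deduplicated list.
theorem pv_alt_eq_S (s : List Int) (n : Int) :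
    get_set_mask_alt s n = pvS (PySem.Set.ofList s) n := by
  unfold get_set_mask_alt pvS
  generalize PySem.Set.ofList s = L
  induction L with
  | nil => rfl
  | cons x L ih =>
      by_cases hx : 1 ≤ x ∧ x ≤ n
      · have hsh : (1 : Int) <<< (n - x).toNat = (2 : Int) ^ (n - x).toNat := by
          rw [Int.shiftLeft_eq]; ring
        simp [hx.1, hx.2, ih, hsh]
      · have : ¬ (decide (1 ≤ x) && decide (x ≤ n)) = true := by
          simp only [Bool.and_eq_true, decide_eq_true_eq]; exact hx
        simp [this, ih, hx]

theorem pv_main (s : List Int) (N : Nat) :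
    get_set_mask s (N : Int) = pvS (PySem.Set.ofList s) (N : Int) := by
  induction N with
  | zero =>
      unfold get_set_mask
      rw [PySem.List.pyRange_one_eq_nil (by norm_num)]
      rw [pvS_nonpos (PySem.Set.ofList s) ((0:Nat):Int) (by norm_num)]
      rfl
  | succ N ih =>
      unfold get_set_mask at ih ⊢
      have hcast : ((N + 1 : Nat) : Int) + 1 = ((N : Int) + 1) + 1 := by push_cast; ring
      rw [hcast, PySem.List.pyRange_one_succ_right (by omega), List.foldl_append]
      rw [ih]
      have hnn : 0 ≤ pvS (PySem.Set.ofList s) (N : Int) := pvS_nonneg _ _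
      have hS := pvS_succ (PySem.Set.ofList s) (N : Int) (by positivity)
        (PySem.Set.nodup_ofList s)
      rw [show ((N + 1 : Nat) : Int) = (N : Int) + 1 by push_cast; ring, hS]
      simp only [List.foldl_cons, List.foldl_nil, List.contains_iff_mem,
        PySem.Set.mem_ofList]
      by_cases hc : ((N : Int) + 1) ∈ s
      · rw [if_pos hc, if_pos hc, pv_lor_step _ hnn]
      · rw [if_neg hc, if_neg hc, pv_shift_one]
        ring

-- ===== VERDICT (by name: the statement is the Claim_ definition above) =====
theorem get_set_mask_spec : Claim_equal_get_set_mask := by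
  intro s n _
  unfold Spec_get_set_mask
  rw [pv_alt_eq_S]
  by_cases hn : 0 ≤ n
  · have : n = ((n.toNat : Nat) : Int) := by omega
    rw [this, pv_main]
  · unfold get_set_mask
    rw [PySem.List.pyRange_one_eq_nil (by omega)]
    rw [pvS_nonpos (PySem.Set.ofList s) n (by omega)]
    rfl
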